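-- pv_equiv track=rewrite | github.com/keerthiherer/Bharat-AI-in-SoC | knowledge_base.py | _search_in_dict
-- ===== SOURCE A (Python) =====
-- def _search_in_dict(query, kb_dict):
--     """Search for exact match or partial match"""
--     # Exact match
--     for key, value in kb_dict.items():
--         if key.lower() == query:
--             return value
--
--     # Partial match (substring)
--     for key, value in kb_dict.items():
--         if query in key.lower() or key.lower() in query:
--             return value
--
--     return None
-- ===== SOURCE B (Python) =====
-- def _search_in_dict(query, kb_dict):
--     """Single pass: exact match returns immediately; first substring match is
--     recorded once and returned after the loop if no exact match was found."""
--     candidate = None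
--     for key, value in kb_dict.items():
--         kl = key.lower()
--         if kl == query:
--             return value
--         if candidate is None and (query in kl or kl in query):
--             candidate = value
--     return candidate
-- ===== Notes on version B (the rewrite author's own statement) =====
-- stated objective: alternative
-- what changed: Replaces A's two sequential passes over the dict (exact pass, then substring pass) with a single pass that returns immediately on an exact match and records the first substring candidate once, returned after the loop.
import Mathlib
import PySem

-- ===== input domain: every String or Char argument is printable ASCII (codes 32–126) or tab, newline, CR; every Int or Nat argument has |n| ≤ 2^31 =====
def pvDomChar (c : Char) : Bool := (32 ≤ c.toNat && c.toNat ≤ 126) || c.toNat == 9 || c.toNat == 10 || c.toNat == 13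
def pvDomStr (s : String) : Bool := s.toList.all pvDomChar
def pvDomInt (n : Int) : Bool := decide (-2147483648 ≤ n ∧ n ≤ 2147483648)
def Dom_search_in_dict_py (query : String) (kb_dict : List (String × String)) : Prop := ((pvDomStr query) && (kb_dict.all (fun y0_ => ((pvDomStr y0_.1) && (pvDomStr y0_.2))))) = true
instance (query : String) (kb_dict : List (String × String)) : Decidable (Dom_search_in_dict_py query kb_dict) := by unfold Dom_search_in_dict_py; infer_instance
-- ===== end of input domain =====

-- One honest line: B replaces A's two sequential passes with a single pass that
-- returns immediately on an exact match and records the first substring candidate.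

-- ===== PORT A =====
def pvScanExactA (query : String) : List (String × String) → Option String
  | [] => none
  | (k, v) :: t => if PySem.Str.lower k = query then some v else pvScanExactA query t

def pvScanSubA (query : String) : List (String × String) → Option String
  | [] => none
  | (k, v) :: t =>
      if PySem.Str.isIn query (PySem.Str.lower k) || PySem.Str.isIn (PySem.Str.lower k) query
      then some v else pvScanSubA query t

def search_in_dict_py (query : String) (kb_dict : List (String × String)) : Option String :=
  match pvScanExactA query kb_dict with
  | some v => some v
  | none => pvScanSubA query kb_dict

-- ===== PORT B =====
def pvScanB (query : String) (cand : Option String) : List (String × String) → Option String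
  | [] => cand
  | (k, v) :: t =>
      let kl := PySem.Str.lower k
      if kl = query then some v
      else
        pvScanB query
          (if cand.isNone && (PySem.Str.isIn query kl || PySem.Str.isIn kl query)
           then some v else cand) t

def search_in_dict_py_alt (query : String) (kb_dict : List (String × String)) : Option String :=
  pvScanB query none kb_dict

-- ===== PRECONDITION & SPEC =====
def Spec_search_in_dict_py (query : String) (kb_dict : List (String × String)) (out : Option String) : Prop := out = search_in_dict_py_alt query kb_dict
instance (query : String) (kb_dict : List (String × String)) (out : Option String) : Decidable (Spec_search_in_dict_py query kb_dict out) := by unfold Spec_search_in_dict_py; infer_instance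

-- ===== CLAIM (what is proved, stated in full; the proofs are below) =====
def Claim_equal_search_in_dict_py : Prop := ∀ (query : String) (kb_dict : List (String × String)), Dom_search_in_dict_py query kb_dict → Spec_search_in_dict_py query kb_dict (search_in_dict_py query kb_dict)

-- ===== LEMMAS AND PROOFS =====
theorem pvScanB_eq (query : String) (l : List (String × String)) (cand : Option String) :
    pvScanB query cand l =
      match pvScanExactA query l with
      | some v => some v
      | none => match cand with
                | some c => some c
                | none => pvScanSubA query l := by
  induction l generalizing cand with
  | nil => cases cand <;> simp [pvScanB, pvScanExactA, pvScanSubA]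
  | cons h t ih =>
      obtain ⟨k, v⟩ := h
      by_cases he : PySem.Str.lower k = query
      · simp [pvScanB, pvScanExactA, he]
      · cases cand with
        | some c =>
            simp [pvScanB, pvScanExactA, he, ih]
        | none =>
            simp [pvScanB, pvScanExactA, pvScanSubA, he, ih]
            split_ifs <;> simp

-- ===== VERDICT (by name: the statement is the Claim_ definition above) =====
theorem search_in_dict_py_spec : Claim_equal_search_in_dict_py := by
  intro query kb_dict _
  unfold Spec_search_in_dict_py search_in_dict_py search_in_dict_py_alt
  rw [pvScanB_eq]
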